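-- pv_equiv track=rewrite | github.com/pedroblackjsousa/csgostatsportugal | csgostats.py | gamestart
-- ===== SOURCE A (Python) =====
-- def findlo3(list):
-- 	live = 0
-- 	if len(list)>=18:
-- 		if "round_freeze_end" in list[-1]:
-- 			templist = list[-18:]
-- 			for element in templist:
-- 				if "Event: round_start" in element:
-- 					live +=1
-- 			if live >=3:
-- 				return True
-- 	return False
--
-- def gamestart(logfile):
-- 	lock = 0
-- 	listlo3 = []
-- 	game = []
-- 	for line in logfile:
-- 		if lock == 1:
-- 			game.append(line.strip())
-- 		if findlo3(listlo3):
-- 			lock=1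
-- 		if lock == 0:
-- 			listlo3.append(line.strip())
-- 		else:
-- 			continue
-- 	if len(game) == 0:
-- 		return listlo3
-- 	return game
-- ===== SOURCE B (Python) =====
-- def findlo3(list):
-- 	live = 0
-- 	if len(list)>=18:
-- 		if "round_freeze_end" in list[-1]:
-- 			templist = list[-18:]
-- 			for element in templist:
-- 				if "Event: round_start" in element:
-- 					live +=1
-- 			if live >=3:
-- 				return True
-- 	return False
--
-- def gamestart(logfile):
-- 	lines = [l.strip() for l in logfile]
-- 	for j in range(18, len(lines)):
-- 		if findlo3(lines[j-18:j]):
-- 			return lines[j+1:] or lines[:j]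
-- 	return lines
-- ===== Notes on version B (the rewrite author's own statement) =====
-- stated objective: simpler
-- what changed: Replaces A's lock/listlo3/game accumulator state machine with a single strip pass plus a sliding 18-line-window search for the first trigger index, returning the result by two slices (tail after the trigger, with fallback to the pre-trigger prefix when the tail is empty).
import Mathlib
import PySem

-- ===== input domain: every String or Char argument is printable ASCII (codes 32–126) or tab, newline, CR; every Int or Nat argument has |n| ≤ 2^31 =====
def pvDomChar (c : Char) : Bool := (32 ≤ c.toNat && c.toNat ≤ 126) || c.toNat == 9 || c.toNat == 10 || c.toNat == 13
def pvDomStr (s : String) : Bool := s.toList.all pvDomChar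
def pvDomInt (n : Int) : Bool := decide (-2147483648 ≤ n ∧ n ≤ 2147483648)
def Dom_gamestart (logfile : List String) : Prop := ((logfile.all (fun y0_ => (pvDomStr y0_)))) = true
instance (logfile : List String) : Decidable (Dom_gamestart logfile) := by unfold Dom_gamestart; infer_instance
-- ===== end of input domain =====

-- B replaces A's lock/listlo3/game state machine by: strip once, slide an
-- 18-line window to find the first trigger index, then slice out the tail
-- (with A's fallback to the pre-trigger prefix when the tail is empty).

-- ===== PORT A =====
-- shared helper, transliterated from findlo3
def findlo3 (lst : List String) : Bool :=
  let live : Int := 0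
  if 18 ≤ lst.length then
    if PySem.Str.isIn "round_freeze_end" ((PySem.List.pyGet? lst (-1)).getD "") then
      -- pyGet? lst (-1) is some _ here since lst.length ≥ 18
      let templist := PySem.List.slice lst (some (-18)) none
      let live := templist.foldl
        (fun live element => if PySem.Str.isIn "Event: round_start" element then live + 1 else live) live
      if 3 ≤ live then true else false
    else false
  else false

def gsStep (s : Int × List String × List String) (line : String) :
    Int × List String × List String :=
  let lock := s.1
  let listlo3 := s.2.1
  let game := s.2.2
  let game := if lock == 1 then game ++ [PySem.Str.strip line] else game
  let lock := if findlo3 listlo3 then 1 else lock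
  let listlo3 := if lock == 0 then listlo3 ++ [PySem.Str.strip line] else listlo3
  (lock, listlo3, game)

def gamestart (logfile : List String) : List String :=
  let s := logfile.foldl gsStep ((0 : Int), ([] : List String), ([] : List String))
  if s.2.2.length == 0 then s.2.1 else s.2.2

-- ===== PORT B =====
-- the index loop 'for j in range(18, len(lines)): …' of Source B
def gsScan (lines : List String) (j : Nat) : List String :=
  if _h : j < lines.length then
    if findlo3 (PySem.List.slice lines (some ((j : Int) - 18)) (some (j : Int))) then
      let game := PySem.List.slice lines (some ((j : Int) + 1)) none
      if game.isEmpty then PySem.List.slice lines none (some (j : Int)) else game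
    else gsScan lines (j + 1)
  else lines
termination_by lines.length - j

def gamestart_alt (logfile : List String) : List String :=
  let lines := logfile.map PySem.Str.strip
  gsScan lines 18

-- ===== PRECONDITION & SPEC =====
def Spec_gamestart (logfile : List String) (out : List String) : Prop := out = gamestart_alt logfile
instance (logfile : List String) (out : List String) : Decidable (Spec_gamestart logfile out) := by unfold Spec_gamestart; infer_instance

-- ===== CLAIM (what is proved, stated in full; the proofs are below) =====
def Claim_equal_gamestart : Prop := ∀ (logfile : List String), Dom_gamestart logfile → Spec_gamestart logfile (gamestart logfile)

-- ===== LEMMAS AND PROOFS =====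

-- reference recursion: A's behaviour from an unlocked state with pre-trigger prefix L
def gsRef (L : List String) : List String → List String
  | [] => L
  | x :: rest =>
      if findlo3 L then
        (if (rest.map PySem.Str.strip).length = 0 then L else rest.map PySem.Str.strip)
      else gsRef (L ++ [PySem.Str.strip x]) rest

-- proof-side index scan checking the full prefix (B's scan, window replaced by the prefix)
def gsIdx (lines : List String) (j : Nat) : List String :=
  if _h : j < lines.length then
    if findlo3 (PySem.List.slice lines none (some (j : Int))) then
      let game := PySem.List.slice lines (some ((j : Int) + 1)) none
      if game.isEmpty then PySem.List.slice lines none (some (j : Int)) else game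
    else gsIdx lines (j + 1)
  else lines
termination_by lines.length - j

lemma fold_locked (xs : List String) (L G : List String) :
    xs.foldl gsStep (1, L, G) = (1, L, G ++ xs.map PySem.Str.strip) := by
  induction xs generalizing G with
  | nil => simp
  | cons x rest ih =>
      simp only [List.foldl_cons, List.map_cons]
      have hstep : gsStep (1, L, G) x = (1, L, G ++ [PySem.Str.strip x]) := by
        simp [gsStep]
      rw [hstep, ih]
      simp

lemma fold_unlocked (xs : List String) (L : List String) :
    (let s := xs.foldl gsStep (0, L, ([] : List String));
     if s.2.2.length == 0 then s.2.1 else s.2.2) = gsRef L xs := by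
  induction xs generalizing L with
  | nil => simp [gsRef]
  | cons x rest ih =>
      by_cases h : findlo3 L
      · have hstep : gsStep (0, L, ([] : List String)) x = (1, L, []) := by
          simp [gsStep, h]
        simp only [List.foldl_cons, hstep, fold_locked, gsRef, h, if_true]
        by_cases hr : (rest.map PySem.Str.strip).length = 0
        · simp [List.length_eq_zero_iff.mp hr]
        · simp
      · have hstep : gsStep (0, L, ([] : List String)) x = (0, L ++ [PySem.Str.strip x], []) := by
          simp [gsStep, h]
        simp only [List.foldl_cons, hstep, gsRef, h]
        exact ih (L ++ [PySem.Str.strip x])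

lemma gsIdx_eq_gsRef (xs L : List String) :
    gsIdx (L ++ xs.map PySem.Str.strip) L.length = gsRef L xs := by
  induction xs generalizing L with
  | nil =>
      rw [gsIdx]
      simp [gsRef]
  | cons x rest ih =>
      rw [gsIdx]
      have hlen : L.length < (L ++ (x :: rest).map PySem.Str.strip).length := by
        simp
      have htake : PySem.List.slice (L ++ (x :: rest).map PySem.Str.strip) none (some (L.length : Int))
          = L := by
        rw [PySem.List.slice_to_natCast]
        exact List.take_left
      have hdrop : PySem.List.slice (L ++ (x :: rest).map PySem.Str.strip)
          (some ((L.length : Int) + 1)) none = rest.map PySem.Str.strip := by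
        have : ((L.length : Int) + 1) = ((L.length + 1 : Nat) : Int) := by push_cast; ring
        rw [this, PySem.List.slice_from_natCast]
        have : L ++ (x :: rest).map PySem.Str.strip
            = (L ++ [PySem.Str.strip x]) ++ rest.map PySem.Str.strip := by simp
        rw [this]
        have hl : (L ++ [PySem.Str.strip x]).length = L.length + 1 := by simp
        rw [← hl]
        exact List.drop_left
      rw [dif_pos hlen, htake]
      simp only [gsRef]
      by_cases h : findlo3 L
      · simp only [h, if_true, hdrop]
        by_cases hr : rest.map PySem.Str.strip = []
        · simp [hr]
        · have hre : rest ≠ [] := fun e => hr (by simp [e])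
          simp [hre]
      · simp only [h]
        have hassoc : L ++ (x :: rest).map PySem.Str.strip
            = (L ++ [PySem.Str.strip x]) ++ rest.map PySem.Str.strip := by simp
        have hl : L.length + 1 = (L ++ [PySem.Str.strip x]).length := by simp
        rw [hassoc, hl]
        exact ih (L ++ [PySem.Str.strip x])

-- findlo3 only looks at the length bound, the last element and the last 18 elements
lemma findlo3_congr (X Y : List String) (h1 : 18 ≤ X.length) (h2 : 18 ≤ Y.length)
    (h3 : X.getLast? = Y.getLast?)
    (h4 : X.drop (X.length - 18) = Y.drop (Y.length - 18)) :
    findlo3 X = findlo3 Y := by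
  unfold findlo3
  rw [PySem.List.pyGet?_neg_one, PySem.List.pyGet?_neg_one,
      PySem.List.slice_from_neg_ofNat X 18 (by norm_num),
      PySem.List.slice_from_neg_ofNat Y 18 (by norm_num), h3, h4]
  simp [h1, h2]

-- the 18-line window decides the trigger exactly as the whole prefix does
lemma findlo3_window (lines : List String) (j : Nat) (h18 : 18 ≤ j) (hj : j ≤ lines.length) :
    findlo3 (PySem.List.slice lines (some ((j : Int) - 18)) (some (j : Int)))
      = findlo3 (PySem.List.slice lines none (some (j : Int))) := by
  have hc : ((j : Int) - 18) = ((j - 18 : Nat) : Int) := by omega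
  rw [hc, PySem.List.slice_natCast, PySem.List.slice_to_natCast]
  have h18' : j - (j - 18) = 18 := by omega
  rw [h18']
  set W := (lines.drop (j - 18)).take 18 with hW
  set P := lines.take j with hP
  have hPlen : P.length = j := by simp [hP]; omega
  have hWlen : W.length = 18 := by simp [hW]; omega
  have hPW : P.drop (j - 18) = W := by
    rw [hP, List.drop_take, h18']
  apply findlo3_congr
  · omega
  · omega
  · rw [← hPW, List.getLast?_drop, hPlen]
    have : ¬ j ≤ j - 18 := by omega
    simp [this]
  · rw [hWlen, hPlen]
    simp only [Nat.sub_self, List.drop_zero]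
    exact hPW.symm

lemma gsScan_eq_gsIdx (lines : List String) :
    ∀ k j, 18 ≤ j → lines.length - j ≤ k → gsScan lines j = gsIdx lines j := by
  intro k
  induction k with
  | zero =>
      intro j _ hk
      rw [gsScan, gsIdx]
      have : ¬ j < lines.length := by omega
      simp [this]
  | succ m ih =>
      intro j h18 hk
      rw [gsScan, gsIdx]
      by_cases h : j < lines.length
      · rw [findlo3_window lines j h18 (by omega), PySem.List.slice_to_natCast]
        by_cases hf : findlo3 (lines.take j) = true
        · simp [h, hf]
        · simp only [h, hf, dif_pos]
          exact ih (j + 1) (by omega) (by omega)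
      · simp [h]

lemma findlo3_short (X : List String) (h : X.length < 18) : findlo3 X = false := by
  unfold findlo3
  have h' : ¬ 18 ≤ X.length := by omega
  simp [h']

lemma gsIdx_succ_of_lt18 (lines : List String) (j : Nat) (hj : j < 18) :
    gsIdx lines j = gsIdx lines (j + 1) := by
  by_cases h : j < lines.length
  · have hf : findlo3 (lines.take j) = false := by
      apply findlo3_short
      simp only [List.length_take]
      omega
    rw [gsIdx, PySem.List.slice_to_natCast]
    simp [h, hf]
  · rw [gsIdx, gsIdx]
    have h1 : ¬ j + 1 < lines.length := by omega
    simp [h, h1]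

lemma gsIdx_zero_eq_18 (lines : List String) : gsIdx lines 0 = gsIdx lines 18 := by
  have step : ∀ m, m ≤ 18 → gsIdx lines (18 - m) = gsIdx lines 18 := by
    intro m
    induction m with
    | zero => intro _; rfl
    | succ p ih =>
        intro h
        rw [gsIdx_succ_of_lt18 lines (18 - (p + 1)) (by omega)]
        have : 18 - (p + 1) + 1 = 18 - p := by omega
        rw [this]
        exact ih (by omega)
  simpa using step 18 (by omega)

-- ===== VERDICT (by name: the statement is the Claim_ definition above) =====
theorem gamestart_spec : Claim_equal_gamestart := by
  intro logfile _
  show gamestart logfile = gamestart_alt logfile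
  have hA := fold_unlocked logfile []
  have hB := gsIdx_eq_gsRef logfile []
  simp only [List.nil_append, List.length_nil] at hB
  have hscan : gsScan (logfile.map PySem.Str.strip) 18
      = gsIdx (logfile.map PySem.Str.strip) 18 :=
    gsScan_eq_gsIdx _ (logfile.map PySem.Str.strip).length 18 (by omega) (by omega)
  unfold gamestart gamestart_alt
  rw [hscan, ← gsIdx_zero_eq_18, hB]
  simpa using hA
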